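-- pv_equiv track=rewrite | github.com/pkanduri1/cm3-batch-automations | scripts/generate_manifest_validation_scenarios.py | apply_scenario_mutations
-- ===== SOURCE A (Python) =====
-- from typing import List, Dict
--
-- def apply_scenario_mutations(lines: List[str], scenario: str) -> List[str]:
--     out = lines[:]
--     if scenario == "short_rows":
--         for i in [0, 5, 10, 15, 20, 25]:
--             out[i] = out[i][:-3]
--     elif scenario == "long_rows":
--         for i in [1, 6, 11, 16, 21, 26]:
--             out[i] = out[i] + "XYZ"
--     elif scenario == "invalid_valid_values":
--         for i in [2, 12, 22]:
--             row = list(out[i])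
--             # COUNTRY starts after REC_TYPE(2)+ACCOUNT_ID(10)+CUSTOMER_ID(8)=20
--             row[20:23] = list("ZZZ")
--             out[i] = "".join(row)
--     elif scenario == "required_empty":
--         for i in [3, 13, 23]:
--             row = list(out[i])
--             # ACCOUNT_ID starts at 2 len 10
--             row[2:12] = list(" " * 10)
--             out[i] = "".join(row)
--     elif scenario == "invalid_dates":
--         for i in [4, 14, 24]:
--             row = list(out[i])
--             # OPEN_DATE start: 2+10+8+3+2+5 = 30, len 8
--             row[30:38] = list("20251340")
--             out[i] = "".join(row)
--     elif scenario == "invalid_numeric_format":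
--         for i in [5, 15, 25]:
--             row = list(out[i])
--             # BALANCE start: through CLOSE_DATE end => 46, len 13
--             row[46:59] = list("A000000000000")
--             out[i] = "".join(row)
--     elif scenario == "mixed_errors":
--         out = apply_scenario_mutations(out, "short_rows")
--         out = apply_scenario_mutations(out, "invalid_numeric_format")
--         out = apply_scenario_mutations(out, "invalid_valid_values")
--     elif scenario == "invalid_postal":
--         for i in [7, 17, 27]:
--             row = list(out[i])
--             # POSTAL start: 25 len 5
--             row[25:30] = list("12A4B")
--             out[i] = "".join(row)
--     elif scenario == "invalid_currency_and_status":
--         for i in [8, 18, 28]: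
--             row = list(out[i])
--             # STATUS start around after CREDIT_LIMIT: 59+13=72, len1
--             row[72:73] = list("X")
--             # CURRENCY start around CODE3 end: compute direct by cumulative
--             # REC(2)+10+8+3+2+5+8+8+13+13+1+3+5+11+8+3+3 = 106
--             row[106:109] = list("EUR")
--             out[i] = "".join(row)
--     return out
-- ===== SOURCE B (Python) =====
-- from typing import List
--
-- def _splice(r: str, a: int, b: int, repl: str) -> str:
--     # string form of Python's list slice assignment row[a:b] = list(repl)
--     return r[:a] + repl + r[b:]
--
-- def _mutate1(i: int, r: str, scenario: str) -> str:
--     # decide arithmetically, from the row position alone, whether and how this row changes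
--     if scenario == "short_rows" and i % 5 == 0 and i <= 25:
--         return r[:-3]
--     if scenario == "long_rows" and i % 5 == 1 and i <= 26:
--         return r + "XYZ"
--     if scenario == "invalid_valid_values" and i % 10 == 2 and i <= 22:
--         return _splice(r, 20, 23, "ZZZ")
--     if scenario == "required_empty" and i % 10 == 3 and i <= 23:
--         return _splice(r, 2, 12, " " * 10)
--     if scenario == "invalid_dates" and i % 10 == 4 and i <= 24:
--         return _splice(r, 30, 38, "20251340")
--     if scenario == "invalid_numeric_format" and i % 10 == 5 and i <= 25:
--         return _splice(r, 46, 59, "A000000000000")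
--     if scenario == "invalid_postal" and i % 10 == 7 and i <= 27:
--         return _splice(r, 25, 30, "12A4B")
--     if scenario == "invalid_currency_and_status" and i % 10 == 8 and i <= 28:
--         return _splice(_splice(r, 72, 73, "X"), 106, 109, "EUR")
--     return r
--
-- def _mutate(i: int, r: str, scenario: str) -> str:
--     if scenario == "mixed_errors":
--         return _mutate1(i, _mutate1(i, _mutate1(i, r, "short_rows"),
--                                     "invalid_numeric_format"), "invalid_valid_values")
--     return _mutate1(i, r, scenario)
--
-- def apply_scenario_mutations(lines: List[str], scenario: str) -> List[str]:
--     return [_mutate(i, r, scenario) for i, r in enumerate(lines)]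
-- ===== Notes on version B (the rewrite author's own statement) =====
-- stated objective: alternative
-- what changed: A copies the list and scatter-updates rows at hard-coded index lists per scenario (recursing for mixed_errors); B builds the result in one enumerate pass, deciding per row from index arithmetic (i % 5 / i % 10 and an upper bound) whether and how that row is transformed, with slice assignment replaced by string concatenation r[:a]+repl+r[b:].
-- crash fix: On known scenarios with fewer lines than the scenario's largest hard-coded index+1, A raises IndexError while B returns the list with only the existing rows mutated. — e.g. on apply_scenario_mutations([], "short_rows"): A raises IndexError, B returns []
import Mathlib
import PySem

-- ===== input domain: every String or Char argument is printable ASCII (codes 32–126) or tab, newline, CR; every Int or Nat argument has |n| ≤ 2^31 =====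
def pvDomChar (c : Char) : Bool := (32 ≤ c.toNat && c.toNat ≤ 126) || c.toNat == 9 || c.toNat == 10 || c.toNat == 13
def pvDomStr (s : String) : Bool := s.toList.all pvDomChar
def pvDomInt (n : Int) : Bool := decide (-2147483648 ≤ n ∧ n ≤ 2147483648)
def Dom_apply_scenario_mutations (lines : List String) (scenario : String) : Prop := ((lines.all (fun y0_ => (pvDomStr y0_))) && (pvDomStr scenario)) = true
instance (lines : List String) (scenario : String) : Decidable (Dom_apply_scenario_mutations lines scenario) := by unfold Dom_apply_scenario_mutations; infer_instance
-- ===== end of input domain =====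

set_option maxHeartbeats 1000000


-- One honest line: B replaces A's per-scenario scatter-updates at hard-coded index lists (with a
-- recursive call for mixed_errors) by a single enumerate pass that decides each row's edit from
-- index arithmetic (i % 5 / i % 10 and an upper bound); equivalence is on the return value.

-- ===== PORT A =====
-- out[i] = f(out[i]) for a list of strings; inside Pre_ every index is in range, so
-- List.set / List.getD compute exactly what Python's read+assign compute.
-- "".join(row) after row[a:b] = list(repl) is row[:a] ++ repl ++ row[b:] (Python list slice
-- assignment; a,b nonnegative literals here), ported with PySem.List.slice.
-- A's recursive call in the mixed_errors branch only ever passes non-"mixed_errors"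
-- scenarios, so it is ported by one level of unfolding into the helper pvA_once,
-- which is the literal elif chain minus the mixed_errors branch.
def pvA_once (out : List String) (scenario : String) : List String :=
  if scenario == "short_rows" then
    [0, 5, 10, 15, 20, 25].foldl (fun out i =>
      out.set i (String.ofList (PySem.List.slice (out.getD i "").toList none (some (-3))))) out
  else if scenario == "long_rows" then
    [1, 6, 11, 16, 21, 26].foldl (fun out i =>
      out.set i (String.ofList ((out.getD i "").toList ++ "XYZ".toList))) out
  else if scenario == "invalid_valid_values" then
    [2, 12, 22].foldl (fun out i =>
      let row := (out.getD i "").toList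
      out.set i (String.ofList (PySem.List.slice row none (some 20) ++ "ZZZ".toList ++
                            PySem.List.slice row (some 23) none))) out
  else if scenario == "required_empty" then
    [3, 13, 23].foldl (fun out i =>
      let row := (out.getD i "").toList
      out.set i (String.ofList (PySem.List.slice row none (some 2) ++ "          ".toList ++
                            PySem.List.slice row (some 12) none))) out
  else if scenario == "invalid_dates" then
    [4, 14, 24].foldl (fun out i =>
      let row := (out.getD i "").toList
      out.set i (String.ofList (PySem.List.slice row none (some 30) ++ "20251340".toList ++
                            PySem.List.slice row (some 38) none))) out
  else if scenario == "invalid_numeric_format" then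
    [5, 15, 25].foldl (fun out i =>
      let row := (out.getD i "").toList
      out.set i (String.ofList (PySem.List.slice row none (some 46) ++ "A000000000000".toList ++
                            PySem.List.slice row (some 59) none))) out
  else if scenario == "invalid_postal" then
    [7, 17, 27].foldl (fun out i =>
      let row := (out.getD i "").toList
      out.set i (String.ofList (PySem.List.slice row none (some 25) ++ "12A4B".toList ++
                            PySem.List.slice row (some 30) none))) out
  else if scenario == "invalid_currency_and_status" then
    [8, 18, 28].foldl (fun out i =>
      let row := (out.getD i "").toList
      let row := PySem.List.slice row none (some 72) ++ "X".toList ++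
                 PySem.List.slice row (some 73) none
      out.set i (String.ofList (PySem.List.slice row none (some 106) ++ "EUR".toList ++
                            PySem.List.slice row (some 109) none))) out
  else out

def apply_scenario_mutations (lines : List String) (scenario : String) : List String :=
  if scenario == "mixed_errors" then
    pvA_once (pvA_once (pvA_once lines "short_rows") "invalid_numeric_format") "invalid_valid_values"
  else pvA_once lines scenario

-- ===== PORT B =====
-- _splice(r, a, b, repl) = r[:a] + repl + r[b:]
def pvSpliceB (r : String) (a b : Int) (repl : String) : String :=
  String.ofList (PySem.List.slice r.toList none (some a) ++ repl.toList ++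
                 PySem.List.slice r.toList (some b) none)

-- _mutate1: per-row edit decided arithmetically from the row index (Python's sequential
-- `if … return` chain becomes the corresponding if-else chain)
def pvMutate1 (i : Int) (r : String) (scenario : String) : String :=
  if scenario == "short_rows" ∧ PySem.Int.mod i 5 = 0 ∧ i ≤ 25 then
    String.ofList (PySem.List.slice r.toList none (some (-3)))
  else if scenario == "long_rows" ∧ PySem.Int.mod i 5 = 1 ∧ i ≤ 26 then
    String.ofList (r.toList ++ "XYZ".toList)
  else if scenario == "invalid_valid_values" ∧ PySem.Int.mod i 10 = 2 ∧ i ≤ 22 then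
    pvSpliceB r 20 23 "ZZZ"
  else if scenario == "required_empty" ∧ PySem.Int.mod i 10 = 3 ∧ i ≤ 23 then
    pvSpliceB r 2 12 "          "
  else if scenario == "invalid_dates" ∧ PySem.Int.mod i 10 = 4 ∧ i ≤ 24 then
    pvSpliceB r 30 38 "20251340"
  else if scenario == "invalid_numeric_format" ∧ PySem.Int.mod i 10 = 5 ∧ i ≤ 25 then
    pvSpliceB r 46 59 "A000000000000"
  else if scenario == "invalid_postal" ∧ PySem.Int.mod i 10 = 7 ∧ i ≤ 27 then
    pvSpliceB r 25 30 "12A4B"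
  else if scenario == "invalid_currency_and_status" ∧ PySem.Int.mod i 10 = 8 ∧ i ≤ 28 then
    pvSpliceB (pvSpliceB r 72 73 "X") 106 109 "EUR"
  else r

def pvMutate (i : Int) (r : String) (scenario : String) : String :=
  if scenario == "mixed_errors" then
    pvMutate1 i (pvMutate1 i (pvMutate1 i r "short_rows") "invalid_numeric_format")
      "invalid_valid_values"
  else pvMutate1 i r scenario

-- [ _mutate(i, r, scenario) for i, r in enumerate(lines) ]
def apply_scenario_mutations_alt (lines : List String) (scenario : String) : List String :=
  (PySem.List.enumerate lines).map (fun p => pvMutate p.1 p.2 scenario)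

-- ===== PRECONDITION & SPEC =====
-- Pre_ excludes exactly the inputs where Python A raises IndexError: each scenario reads and
-- assigns out[i] at fixed indices, so lines must be long enough to contain the largest one.
def Pre_apply_scenario_mutations (lines : List String) (scenario : String) : Prop :=
  (scenario = "short_rows" → 26 ≤ lines.length) ∧
  (scenario = "long_rows" → 27 ≤ lines.length) ∧
  (scenario = "invalid_valid_values" → 23 ≤ lines.length) ∧
  (scenario = "required_empty" → 24 ≤ lines.length) ∧
  (scenario = "invalid_dates" → 25 ≤ lines.length) ∧
  (scenario = "invalid_numeric_format" → 26 ≤ lines.length) ∧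
  (scenario = "mixed_errors" → 26 ≤ lines.length) ∧
  (scenario = "invalid_postal" → 28 ≤ lines.length) ∧
  (scenario = "invalid_currency_and_status" → 29 ≤ lines.length)
instance (lines : List String) (scenario : String) : Decidable (Pre_apply_scenario_mutations lines scenario) := by unfold Pre_apply_scenario_mutations; infer_instance

def pvWitness_apply_scenario_mutations : List String × String :=
  (["a", "b", "c", "d", "e", "f", "g", "h", "i", "j", "k", "l", "m",
    "n", "o", "p", "q", "r", "s", "t", "u", "v", "w", "x", "y", "z"], "short_rows")

-- On known scenarios with fewer lines than the scenario's largest hard-coded index + 1,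
-- A raises IndexError while B returns the list with only the existing rows mutated.
def Raises_apply_scenario_mutations (lines : List String) (scenario : String) : Prop :=
  (scenario = "short_rows" ∧ lines.length < 26) ∨
  (scenario = "long_rows" ∧ lines.length < 27) ∨
  (scenario = "invalid_valid_values" ∧ lines.length < 23) ∨
  (scenario = "required_empty" ∧ lines.length < 24) ∨
  (scenario = "invalid_dates" ∧ lines.length < 25) ∨
  (scenario = "invalid_numeric_format" ∧ lines.length < 26) ∨
  (scenario = "mixed_errors" ∧ lines.length < 26) ∨
  (scenario = "invalid_postal" ∧ lines.length < 28) ∨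
  (scenario = "invalid_currency_and_status" ∧ lines.length < 29)
instance (lines : List String) (scenario : String) : Decidable (Raises_apply_scenario_mutations lines scenario) := by unfold Raises_apply_scenario_mutations; infer_instance

def pvRaiseWitness_apply_scenario_mutations : List String × String := ([], "short_rows")
def pvRaiseWitnessOut_apply_scenario_mutations : List String := []

def Spec_apply_scenario_mutations (lines : List String) (scenario : String) (out : List String) : Prop := out = apply_scenario_mutations_alt lines scenario
instance (lines : List String) (scenario : String) (out : List String) : Decidable (Spec_apply_scenario_mutations lines scenario out) := by unfold Spec_apply_scenario_mutations; infer_instance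

-- ===== CLAIM =====
def Claim_equal_apply_scenario_mutations : Prop := ∀ (lines : List String) (scenario : String), Dom_apply_scenario_mutations lines scenario → Pre_apply_scenario_mutations lines scenario → Spec_apply_scenario_mutations lines scenario (apply_scenario_mutations lines scenario)

def Claim_raises_apply_scenario_mutations : Prop := (∀ (lines : List String) (scenario : String), Dom_apply_scenario_mutations lines scenario → Raises_apply_scenario_mutations lines scenario → ¬ Pre_apply_scenario_mutations lines scenario) ∧ (Dom_apply_scenario_mutations (pvRaiseWitness_apply_scenario_mutations.1) (pvRaiseWitness_apply_scenario_mutations.2) ∧ Raises_apply_scenario_mutations (pvRaiseWitness_apply_scenario_mutations.1) (pvRaiseWitness_apply_scenario_mutations.2) ∧ apply_scenario_mutations_alt (pvRaiseWitness_apply_scenario_mutations.1) (pvRaiseWitness_apply_scenario_mutations.2) = pvRaiseWitnessOut_apply_scenario_mutations)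

-- ===== LEMMAS AND PROOFS =====

def pvStep (f : String → String) (o : List String) (i : Nat) : List String :=
  o.set i (f (o.getD i ""))

lemma pvFoldl_set_length (idxs : List Nat) (f : String → String) (out : List String) :
    (idxs.foldl (pvStep f) out).length = out.length := by
  induction idxs generalizing out with
  | nil => rfl
  | cons i t ih => simp [List.foldl, pvStep, ih]

lemma pvFoldl_set_getElem (idxs : List Nat) (f : String → String) (out : List String)
    (hnd : idxs.Nodup) (hlt : ∀ i ∈ idxs, i < out.length) (j : Nat) (hj : j < out.length) :
    (idxs.foldl (pvStep f) out)[j]'(by rw [pvFoldl_set_length]; exact hj) =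
      if j ∈ idxs then f out[j] else out[j] := by
  induction idxs generalizing out with
  | nil => simp
  | cons i t ih =>
    have hi : i < out.length := hlt i (by simp)
    have hset : (out.set i (f (out.getD i ""))).length = out.length := by simp
    have hlt' : ∀ k ∈ t, k < (out.set i (f (out.getD i ""))).length := by
      intro k hk; rw [hset]; exact hlt k (by simp [hk])
    have h := ih (out.set i (f (out.getD i ""))) hnd.of_cons hlt' (hset ▸ hj)
    simp only [List.foldl, pvStep] at h ⊢
    rw [h]
    have hgd : out.getD i "" = out[i] := List.getD_eq_getElem out "" hi
    simp only [hgd]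
    have hnotmem : i ∉ t := (List.nodup_cons.mp hnd).1
    by_cases hjt : j ∈ t
    · have hij : i ≠ j := fun he => hnotmem (he ▸ hjt)
      simp [hjt, hij]
    · by_cases hji : j = i
      · subst hji; simp [hjt]
      · have hij : i ≠ j := fun he => hji he.symm
        simp [hjt, hij, hji]

lemma pvAlt_length (lines : List String) (scenario : String) :
    (apply_scenario_mutations_alt lines scenario).length = lines.length := by
  simp [apply_scenario_mutations_alt, PySem.List.length_enumerate]

lemma pvAlt_getElem (lines : List String) (scenario : String) (j : Nat) (hj : j < lines.length) :
    (apply_scenario_mutations_alt lines scenario)[j]'(by rw [pvAlt_length]; exact hj) =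
      pvMutate j lines[j] scenario := by
  simp [apply_scenario_mutations_alt, PySem.List.getElem_enumerate]


-- named row transforms (definitionally equal to the loop bodies of both ports)
def pvFS (r : String) : String := String.ofList (PySem.List.slice r.toList none (some (-3)))
def pvFL (r : String) : String := String.ofList (r.toList ++ "XYZ".toList)
def pvFV (r : String) : String := String.ofList (PySem.List.slice r.toList none (some 20) ++ "ZZZ".toList ++ PySem.List.slice r.toList (some 23) none)
def pvFE (r : String) : String := String.ofList (PySem.List.slice r.toList none (some 2) ++ "          ".toList ++ PySem.List.slice r.toList (some 12) none)
def pvFD (r : String) : String := String.ofList (PySem.List.slice r.toList none (some 30) ++ "20251340".toList ++ PySem.List.slice r.toList (some 38) none)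
def pvFN (r : String) : String := String.ofList (PySem.List.slice r.toList none (some 46) ++ "A000000000000".toList ++ PySem.List.slice r.toList (some 59) none)
def pvFP (r : String) : String := String.ofList (PySem.List.slice r.toList none (some 25) ++ "12A4B".toList ++ PySem.List.slice r.toList (some 30) none)
def pvFC (r : String) : String :=
  let row := PySem.List.slice r.toList none (some 72) ++ "X".toList ++ PySem.List.slice r.toList (some 73) none
  String.ofList (PySem.List.slice row none (some 106) ++ "EUR".toList ++ PySem.List.slice row (some 109) none)

-- pvMutate1 at each scenario literal, characterised by index-list membership
lemma pvM1_short (j : Nat) (r : String) :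
    pvMutate1 (j : Int) r "short_rows" = if j ∈ [0, 5, 10, 15, 20, 25] then pvFS r else r := by
  simp [pvMutate1, pvFS]
  split_ifs <;> first | rfl | (exfalso; omega)

lemma pvM1_long (j : Nat) (r : String) :
    pvMutate1 (j : Int) r "long_rows" = if j ∈ [1, 6, 11, 16, 21, 26] then pvFL r else r := by
  simp [pvMutate1, pvFL]
  split_ifs <;> first | rfl | (exfalso; omega)

lemma pvM1_valid (j : Nat) (r : String) :
    pvMutate1 (j : Int) r "invalid_valid_values" = if j ∈ [2, 12, 22] then pvFV r else r := by
  simp [pvMutate1, pvFV, pvSpliceB]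
  split_ifs <;> first | rfl | (exfalso; omega)

lemma pvM1_empty (j : Nat) (r : String) :
    pvMutate1 (j : Int) r "required_empty" = if j ∈ [3, 13, 23] then pvFE r else r := by
  simp [pvMutate1, pvFE, pvSpliceB]
  split_ifs <;> first | rfl | (exfalso; omega)

lemma pvM1_dates (j : Nat) (r : String) :
    pvMutate1 (j : Int) r "invalid_dates" = if j ∈ [4, 14, 24] then pvFD r else r := by
  simp [pvMutate1, pvFD, pvSpliceB]
  split_ifs <;> first | rfl | (exfalso; omega)

lemma pvM1_numeric (j : Nat) (r : String) :
    pvMutate1 (j : Int) r "invalid_numeric_format" = if j ∈ [5, 15, 25] then pvFN r else r := by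
  simp [pvMutate1, pvFN, pvSpliceB]
  split_ifs <;> first | rfl | (exfalso; omega)

lemma pvM1_postal (j : Nat) (r : String) :
    pvMutate1 (j : Int) r "invalid_postal" = if j ∈ [7, 17, 27] then pvFP r else r := by
  simp [pvMutate1, pvFP, pvSpliceB]
  split_ifs <;> first | rfl | (exfalso; omega)

lemma pvM1_currency (j : Nat) (r : String) :
    pvMutate1 (j : Int) r "invalid_currency_and_status" = if j ∈ [8, 18, 28] then pvFC r else r := by
  simp [pvMutate1, pvFC, pvSpliceB]
  split_ifs <;> first | rfl | (exfalso; omega)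

-- one non-mixed scenario: A's scatter loop equals B's enumerate pass
lemma pvScenario_case (lines : List String) (idxs : List Nat) (f : String → String)
    (s0 : String) (hs0 : s0 ≠ "mixed_errors") (hnd : idxs.Nodup)
    (hlt : ∀ i ∈ idxs, i < lines.length)
    (hfun : ∀ (j : Nat) (r : String), pvMutate1 (j : Int) r s0 = if j ∈ idxs then f r else r) :
    idxs.foldl (pvStep f) lines = apply_scenario_mutations_alt lines s0 := by
  apply List.ext_getElem
  · rw [pvFoldl_set_length, pvAlt_length]
  · intro j h1 h2
    have hj : j < lines.length := by rwa [pvFoldl_set_length] at h1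
    rw [pvFoldl_set_getElem idxs f lines hnd hlt j hj, pvAlt_getElem lines s0 j hj,
        pvMutate, hfun]
    simp [beq_eq_false_iff_ne.mpr hs0]

-- ===== VERDICT =====
theorem apply_scenario_mutations_spec : Claim_equal_apply_scenario_mutations := by
  intro lines scenario _ hpre
  unfold Spec_apply_scenario_mutations
  obtain ⟨p1, p2, p3, p4, p5, p6, p7, p8, p9⟩ := hpre
  unfold apply_scenario_mutations
  by_cases h1 : scenario = "short_rows"
  · subst h1
    have hA : pvA_once lines "short_rows" = [0,5,10,15,20,25].foldl (pvStep pvFS) lines := rfl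
    simp only [show (("short_rows" : String) == "mixed_errors") = false from by decide,
      Bool.false_eq_true, if_false, hA]
    exact pvScenario_case lines _ pvFS _ (by decide) (by decide)
      (fun i hi => by have := p1 rfl; fin_cases hi <;> omega) pvM1_short
  by_cases h2 : scenario = "long_rows"
  · subst h2
    have hA : pvA_once lines "long_rows" = [1,6,11,16,21,26].foldl (pvStep pvFL) lines := rfl
    simp only [show (("long_rows" : String) == "mixed_errors") = false from by decide,
      Bool.false_eq_true, if_false, hA]
    exact pvScenario_case lines _ pvFL _ (by decide) (by decide)
      (fun i hi => by have := p2 rfl; fin_cases hi <;> omega) pvM1_long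
  by_cases h3 : scenario = "invalid_valid_values"
  · subst h3
    have hA : pvA_once lines "invalid_valid_values" = [2,12,22].foldl (pvStep pvFV) lines := rfl
    simp only [show (("invalid_valid_values" : String) == "mixed_errors") = false from by decide,
      Bool.false_eq_true, if_false, hA]
    exact pvScenario_case lines _ pvFV _ (by decide) (by decide)
      (fun i hi => by have := p3 rfl; fin_cases hi <;> omega) pvM1_valid
  by_cases h4 : scenario = "required_empty"
  · subst h4
    have hA : pvA_once lines "required_empty" = [3,13,23].foldl (pvStep pvFE) lines := rfl
    simp only [show (("required_empty" : String) == "mixed_errors") = false from by decide,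
      Bool.false_eq_true, if_false, hA]
    exact pvScenario_case lines _ pvFE _ (by decide) (by decide)
      (fun i hi => by have := p4 rfl; fin_cases hi <;> omega) pvM1_empty
  by_cases h5 : scenario = "invalid_dates"
  · subst h5
    have hA : pvA_once lines "invalid_dates" = [4,14,24].foldl (pvStep pvFD) lines := rfl
    simp only [show (("invalid_dates" : String) == "mixed_errors") = false from by decide,
      Bool.false_eq_true, if_false, hA]
    exact pvScenario_case lines _ pvFD _ (by decide) (by decide)
      (fun i hi => by have := p5 rfl; fin_cases hi <;> omega) pvM1_dates
  by_cases h6 : scenario = "invalid_numeric_format"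
  · subst h6
    have hA : pvA_once lines "invalid_numeric_format" = [5,15,25].foldl (pvStep pvFN) lines := rfl
    simp only [show (("invalid_numeric_format" : String) == "mixed_errors") = false from by decide,
      Bool.false_eq_true, if_false, hA]
    exact pvScenario_case lines _ pvFN _ (by decide) (by decide)
      (fun i hi => by have := p6 rfl; fin_cases hi <;> omega) pvM1_numeric
  by_cases h7 : scenario = "invalid_postal"
  · subst h7
    have hA : pvA_once lines "invalid_postal" = [7,17,27].foldl (pvStep pvFP) lines := rfl
    simp only [show (("invalid_postal" : String) == "mixed_errors") = false from by decide,
      Bool.false_eq_true, if_false, hA]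
    exact pvScenario_case lines _ pvFP _ (by decide) (by decide)
      (fun i hi => by have := p8 rfl; fin_cases hi <;> omega) pvM1_postal
  by_cases h8 : scenario = "invalid_currency_and_status"
  · subst h8
    have hA : pvA_once lines "invalid_currency_and_status" = [8,18,28].foldl (pvStep pvFC) lines := rfl
    simp only [show (("invalid_currency_and_status" : String) == "mixed_errors") = false from by decide,
      Bool.false_eq_true, if_false, hA]
    exact pvScenario_case lines _ pvFC _ (by decide) (by decide)
      (fun i hi => by have := p9 rfl; fin_cases hi <;> omega) pvM1_currency
  by_cases h9 : scenario = "mixed_errors"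
  · subst h9
    have hlen := p7 rfl
    have hAS : pvA_once lines "short_rows" = [0,5,10,15,20,25].foldl (pvStep pvFS) lines := rfl
    have hAN : ∀ L, pvA_once L "invalid_numeric_format" = [5,15,25].foldl (pvStep pvFN) L :=
      fun L => rfl
    have hAV : ∀ L, pvA_once L "invalid_valid_values" = [2,12,22].foldl (pvStep pvFV) L :=
      fun L => rfl
    simp only [show (("mixed_errors" : String) == "mixed_errors") = true from by decide,
      if_true, hAS, hAN, hAV]
    set L1 := [0,5,10,15,20,25].foldl (pvStep pvFS) lines with hL1
    set L2 := [5,15,25].foldl (pvStep pvFN) L1 with hL2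
    have hlen1 : L1.length = lines.length := pvFoldl_set_length _ _ _
    have hlen2 : L2.length = lines.length := by rw [hL2, pvFoldl_set_length, hlen1]
    apply List.ext_getElem
    · rw [pvFoldl_set_length, hlen2, pvAlt_length]
    · intro j hja hjb
      have hj : j < lines.length := by rwa [pvFoldl_set_length, hlen2] at hja
      rw [pvFoldl_set_getElem [2,12,22] pvFV L2 (by decide)
            (fun i hi => by rw [hlen2]; fin_cases hi <;> omega) j (by rwa [hlen2]),
          pvFoldl_set_getElem [5,15,25] pvFN L1 (by decide)
            (fun i hi => by rw [hlen1]; fin_cases hi <;> omega) j (by rwa [hlen1]),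
          pvFoldl_set_getElem [0,5,10,15,20,25] pvFS lines (by decide)
            (fun i hi => by fin_cases hi <;> omega) j hj,
          pvAlt_getElem lines _ j hj]
      simp only [pvMutate]
      rw [pvM1_short, pvM1_numeric, pvM1_valid]
      simp
  · -- unknown scenario: both sides return the lines unchanged
    have hb : ∀ p ∈ PySem.List.enumerate lines, pvMutate p.1 p.2 scenario = p.2 := by
      intro p _
      rw [pvMutate, if_neg (by simpa using h9)]
      simp [pvMutate1, h1, h2, h3, h4, h5, h6, h7, h8]
    have hBeq : apply_scenario_mutations_alt lines scenario = lines := by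
      unfold apply_scenario_mutations_alt
      rw [List.map_congr_left hb]
      exact PySem.List.map_snd_enumerate lines 0
    rw [hBeq]
    simp [pvA_once, h1, h2, h3, h4, h5, h6, h7, h8, h9]

theorem apply_scenario_mutations_raises : Claim_raises_apply_scenario_mutations := by
  unfold Claim_raises_apply_scenario_mutations
  refine ⟨?_, by decide⟩
  intro lines scenario _ hr hpre
  obtain ⟨p1, p2, p3, p4, p5, p6, p7, p8, p9⟩ := hpre
  rcases hr with ⟨h, hl⟩ | ⟨h, hl⟩ | ⟨h, hl⟩ | ⟨h, hl⟩ | ⟨h, hl⟩ | ⟨h, hl⟩ | ⟨h, hl⟩ | ⟨h, hl⟩ | ⟨h, hl⟩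
  · exact absurd (p1 h) (by omega)
  · exact absurd (p2 h) (by omega)
  · exact absurd (p3 h) (by omega)
  · exact absurd (p4 h) (by omega)
  · exact absurd (p5 h) (by omega)
  · exact absurd (p6 h) (by omega)
  · exact absurd (p7 h) (by omega)
  · exact absurd (p8 h) (by omega)
  · exact absurd (p9 h) (by omega)

-- self-check: the raise witness indeed falls outside Pre_ (uses the raises theorem)
theorem pvRaiseWitness_outside_pre_ok :
    ¬ Pre_apply_scenario_mutations pvRaiseWitness_apply_scenario_mutations.1
        pvRaiseWitness_apply_scenario_mutations.2 :=
  apply_scenario_mutations_raises.1 _ _ (by decide) apply_scenario_mutations_raises.2.2.1
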